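-- pv_equiv track=rewrite | github.com/miloira/apiok | api_testing_tool/tests/test_folder_tree_properties.py | _collect_subtree_relationships
-- ===== SOURCE A (Python) =====
-- def _collect_subtree_relationships(
--     folder_id: int,
--     children_map: dict[int, list[int]],
--     request_map: dict[int, list[int]],
-- ) -> tuple[set[tuple[int, int]], set[tuple[int, int]]]:
--     """
--     Collect all internal parent-child folder relationships and request-folder
--     assignments within the subtree rooted at *folder_id* (exclusive of the
--     root's own parent link).
--
--     Returns:
--         (folder_relationships, request_assignments)
--         - folder_relationships: set of (child_id, parent_id) for every
--           descendant edge inside the subtree.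
--         - request_assignments: set of (request_id, folder_id) for every
--           request attached to a folder in the subtree.
--     """
--     folder_rels: set[tuple[int, int]] = set()
--     req_assigns: set[tuple[int, int]] = set()
--
--     stack = [folder_id]
--     while stack:
--         current = stack.pop()
--         # Collect requests belonging to this folder
--         for rid in request_map.get(current, []):
--             req_assigns.add((rid, current))
--         # Collect child edges
--         for child in children_map.get(current, []):
--             folder_rels.add((child, current))
--             stack.append(child)
--
--     return folder_rels, req_assigns
-- ===== SOURCE B (Python) =====
-- def _collect_subtree_relationships(
--     folder_id: int,
--     children_map: dict[int, list[int]],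
--     request_map: dict[int, list[int]],
-- ) -> tuple[set[tuple[int, int]], set[tuple[int, int]]]:
--     """Recursive-descent re-implementation: instead of an explicit work stack,
--     a helper visits one folder, records its requests and child edges, then
--     recurses into each child subtree (in reverse child order, preserving the
--     stack version's traversal order; the result sets are the same either way)."""
--     folder_rels: set[tuple[int, int]] = set()
--     req_assigns: set[tuple[int, int]] = set()
--
--     def visit(current: int) -> None:
--         for rid in request_map.get(current, []):
--             req_assigns.add((rid, current))
--         children = children_map.get(current, [])
--         for child in children:
--             folder_rels.add((child, current))
--         for child in reversed(children):
--             visit(child)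
--
--     visit(folder_id)
--     return folder_rels, req_assigns
-- ===== Notes on version B (the rewrite author's own statement) =====
-- stated objective: alternative
-- what changed: Replaces A's explicit while-loop work stack with a recursive helper that visits a folder, records its requests and child edges, and recurses into each child subtree, accumulating into the two shared sets.
import Mathlib
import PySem

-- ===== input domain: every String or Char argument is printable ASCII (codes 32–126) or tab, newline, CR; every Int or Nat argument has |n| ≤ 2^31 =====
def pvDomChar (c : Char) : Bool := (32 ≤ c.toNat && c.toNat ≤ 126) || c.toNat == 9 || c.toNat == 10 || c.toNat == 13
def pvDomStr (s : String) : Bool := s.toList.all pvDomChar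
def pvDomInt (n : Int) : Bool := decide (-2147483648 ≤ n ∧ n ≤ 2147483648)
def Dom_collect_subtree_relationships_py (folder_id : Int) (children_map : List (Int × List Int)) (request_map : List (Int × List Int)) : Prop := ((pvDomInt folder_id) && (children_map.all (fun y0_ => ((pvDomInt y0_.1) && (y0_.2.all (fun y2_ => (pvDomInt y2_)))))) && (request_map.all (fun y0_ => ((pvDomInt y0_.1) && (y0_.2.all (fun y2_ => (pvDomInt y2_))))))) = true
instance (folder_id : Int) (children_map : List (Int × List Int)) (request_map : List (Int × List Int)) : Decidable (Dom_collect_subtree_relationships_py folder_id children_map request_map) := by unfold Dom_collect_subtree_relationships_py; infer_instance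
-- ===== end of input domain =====

-- B replaces A's explicit work stack by a recursive helper that visits one folder and
-- then recurses into its child subtrees (objective: alternative decomposition, same cost).
-- Both Lean ports carry a fuel counter (an artefact of totality): pvFuel bounds the number
-- of folders the Python programs process on any input on which they terminate (the Python
-- programs do not return when the children graph has a cycle reachable from folder_id).

-- ===== PORT A =====

-- fuel: (S+2)^(S+2) where S = total size of children_map; on inputs whose reachable
-- children graph is acyclic, the number of stack pops is at most this bound.
def pvFuel (children_map : List (Int × List Int)) : Nat :=
  let S := children_map.foldl (fun n p => n + 1 + p.2.length) 2
  S ^ S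

-- A's while-loop; the stack is kept top-first (Python pops/pushes at the end, so a
-- pushed child list appears reversed at the head).  Fuel 0 is reached only on inputs where the Python loop never returns.
def pvLoopA (cm rm : List (Int × List Int)) :
    Nat → List Int → List (Int × Int) → List (Int × Int) →
    (List (Int × Int)) × (List (Int × Int))
  | _, [], fr, ra => (fr, ra)
  | 0, _ :: _, fr, ra => (fr, ra)
  | f+1, current :: rest, fr, ra =>
      let ra' := ((PySem.Dict.mk rm).getD current []).foldl
        (fun s rid => PySem.Set.add s (rid, current)) ra
      let st := ((PySem.Dict.mk cm).getD current []).foldl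
        (fun (p : List (Int × Int) × List Int) child =>
          (PySem.Set.add p.1 (child, current), child :: p.2)) (fr, rest)
      pvLoopA cm rm f st.2 st.1 ra'

def collect_subtree_relationships_py (folder_id : Int) (children_map : List (Int × List Int)) (request_map : List (Int × List Int)) : (List (Int × Int)) × (List (Int × Int)) :=
  pvLoopA children_map request_map (pvFuel children_map) [folder_id] [] []

-- ===== PORT B =====

-- Source B's recursive visit; the fuel counter is threaded through the recursion (one unit
-- per visit) and returned, with a proof it never grows, for termination.
mutual
def pvVisit (cm rm : List (Int × List Int)) :
    (f : Nat) → Int → (List (Int × Int)) × (List (Int × Int)) →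
    {p : Nat × ((List (Int × Int)) × (List (Int × Int))) // p.1 ≤ f}
  | 0, _, acc => ⟨(0, acc), Nat.le_refl _⟩
  | f+1, current, acc =>
      let ra' := ((PySem.Dict.mk rm).getD current []).foldl
        (fun s rid => PySem.Set.add s (rid, current)) acc.2
      let children := (PySem.Dict.mk cm).getD current []
      let fr' := children.foldl (fun s child => PySem.Set.add s (child, current)) acc.1
      let r := pvVisitList cm rm f children.reverse (fr', ra')
      ⟨r.val, Nat.le_succ_of_le r.property⟩
  termination_by f _ _ => (f, 0, 0)
  decreasing_by exact Prod.Lex.left _ _ (Nat.lt_succ_self f)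
def pvVisitList (cm rm : List (Int × List Int)) :
    (f : Nat) → List Int → (List (Int × Int)) × (List (Int × Int)) →
    {p : Nat × ((List (Int × Int)) × (List (Int × Int))) // p.1 ≤ f}
  | f, [], acc => ⟨(f, acc), Nat.le_refl _⟩
  | f, c :: cs, acc =>
      let r := pvVisit cm rm f c acc
      let r2 := pvVisitList cm rm r.val.1 cs r.val.2
      ⟨r2.val, Nat.le_trans r2.property r.property⟩
  termination_by f l _ => (f, 1, l.length)
  decreasing_by
    · exact Prod.Lex.right _ (Prod.Lex.left _ _ Nat.zero_lt_one)
    · rcases Nat.lt_or_eq_of_le r.property with h | h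
      · exact Prod.Lex.left _ _ h
      · rw [h]; exact Prod.Lex.right _ (Prod.Lex.right _ (Nat.lt_succ_self _))
end

def collect_subtree_relationships_py_alt (folder_id : Int) (children_map : List (Int × List Int)) (request_map : List (Int × List Int)) : (List (Int × Int)) × (List (Int × Int)) :=
  (pvVisit children_map request_map (pvFuel children_map) folder_id ([], [])).val.2

-- ===== PRECONDITION & SPEC =====

def Spec_collect_subtree_relationships_py (folder_id : Int) (children_map : List (Int × List Int)) (request_map : List (Int × List Int)) (out : (List (Int × Int)) × (List (Int × Int))) : Prop := out = collect_subtree_relationships_py_alt folder_id children_map request_map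
instance (folder_id : Int) (children_map : List (Int × List Int)) (request_map : List (Int × List Int)) (out : (List (Int × Int)) × (List (Int × Int))) : Decidable (Spec_collect_subtree_relationships_py folder_id children_map request_map out) := by unfold Spec_collect_subtree_relationships_py; infer_instance

-- ===== CLAIM (what is proved, stated in full; the proofs are below) =====
def Claim_equal_collect_subtree_relationships_py : Prop := ∀ (folder_id : Int) (children_map : List (Int × List Int)) (request_map : List (Int × List Int)), Dom_collect_subtree_relationships_py folder_id children_map request_map → Spec_collect_subtree_relationships_py folder_id children_map request_map (collect_subtree_relationships_py folder_id children_map request_map)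

-- ===== LEMMAS AND PROOFS =====

-- unfolding equations of the (well-founded) B recursion, stated on the carried value
theorem pvVisit_zero_val (cm rm : List (Int × List Int)) (c : Int) (acc : (List (Int × Int)) × (List (Int × Int))) :
    (pvVisit cm rm 0 c acc).val = (0, acc) := by
  simp [pvVisit]

theorem pvVisit_succ_val (cm rm : List (Int × List Int)) (f : Nat) (current : Int) (acc : (List (Int × Int)) × (List (Int × Int))) :
    (pvVisit cm rm (f+1) current acc).val
      = (pvVisitList cm rm f ((PySem.Dict.mk cm).getD current []).reverse
          (((PySem.Dict.mk cm).getD current []).foldl (fun s child => PySem.Set.add s (child, current)) acc.1,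
           ((PySem.Dict.mk rm).getD current []).foldl (fun s rid => PySem.Set.add s (rid, current)) acc.2)).val := by
  rw [pvVisit]

theorem pvVisitList_nil_val (cm rm : List (Int × List Int)) (f : Nat) (acc : (List (Int × Int)) × (List (Int × Int))) :
    (pvVisitList cm rm f [] acc).val = (f, acc) := by
  rw [pvVisitList]

theorem pvVisitList_cons_val (cm rm : List (Int × List Int)) (f : Nat) (c : Int) (cs : List Int) (acc : (List (Int × Int)) × (List (Int × Int))) :
    (pvVisitList cm rm f (c :: cs) acc).val
      = (pvVisitList cm rm (pvVisit cm rm f c acc).val.1 cs (pvVisit cm rm f c acc).val.2).val := by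
  rw [pvVisitList]

-- A's single loop over the children (building edges and pushing) splits into the edge
-- fold and a reversed push.
theorem pvPairFold (cur : Int) :
    ∀ (children : List Int) (fr : List (Int × Int)) (rest : List Int),
      children.foldl (fun (p : List (Int × Int) × List Int) child =>
          (PySem.Set.add p.1 (child, cur), child :: p.2)) (fr, rest)
        = (children.foldl (fun s child => PySem.Set.add s (child, cur)) fr,
           children.reverse ++ rest) := by
  intro children
  induction children with
  | nil => intro fr rest; simp
  | cons c cs ih =>
      intro fr rest
      simp [List.foldl, ih]

theorem pvVisitList_fuel_zero (cm rm : List (Int × List Int)) :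
    ∀ (l : List Int) (acc : (List (Int × Int)) × (List (Int × Int))),
      (pvVisitList cm rm 0 l acc).val = (0, acc) := by
  intro l
  induction l with
  | nil => intro acc; rw [pvVisitList_nil_val]
  | cons c cs ih => intro acc; rw [pvVisitList_cons_val, pvVisit_zero_val]; exact ih acc

theorem pvVisitList_append (cm rm : List (Int × List Int)) :
    ∀ (xs ys : List Int) (f : Nat) (acc : (List (Int × Int)) × (List (Int × Int))),
      (pvVisitList cm rm f (xs ++ ys) acc).val
        = (pvVisitList cm rm (pvVisitList cm rm f xs acc).val.1 ys
            (pvVisitList cm rm f xs acc).val.2).val := by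
  intro xs
  induction xs with
  | nil => intro ys f acc; rw [List.nil_append, pvVisitList_nil_val]
  | cons c cs ih =>
      intro ys f acc
      rw [List.cons_append, pvVisitList_cons_val, pvVisitList_cons_val, ih]

-- main invariant: A's stack loop computes exactly B's recursion on the pending list
theorem pvMain (cm rm : List (Int × List Int)) :
    ∀ (f : Nat) (stack : List Int) (fr ra : List (Int × Int)),
      pvLoopA cm rm f stack fr ra = (pvVisitList cm rm f stack (fr, ra)).val.2 := by
  intro f
  induction f with
  | zero =>
      intro stack fr ra
      cases stack with
      | nil => rw [pvLoopA, pvVisitList_nil_val]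
      | cons c cs => rw [pvLoopA, pvVisitList_fuel_zero]
  | succ f ih =>
      intro stack fr ra
      cases stack with
      | nil => rw [pvLoopA, pvVisitList_nil_val]
      | cons cur rest =>
          rw [pvLoopA, pvVisitList_cons_val, pvVisit_succ_val]
          simp only [pvPairFold]
          rw [ih, pvVisitList_append]

-- ===== VERDICT (by name: the statement is the Claim_ definition above) =====
theorem collect_subtree_relationships_py_spec : Claim_equal_collect_subtree_relationships_py := by
  intro fid cm rm _
  unfold Spec_collect_subtree_relationships_py collect_subtree_relationships_py collect_subtree_relationships_py_alt
  rw [pvMain, pvVisitList_cons_val, pvVisitList_nil_val]
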